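-- pv_equiv track=rewrite | github.com/abandonedmonk/AI-Driven-PDF-and-Images-to-Data-Converter-Chatbot | pages/1_📄_Documents.py | stop_at_word
-- ===== SOURCE A (Python) =====
-- def stop_at_word(input_string, stop_word):
--     words = input_string.split()
--     result = []
--     for word in words:
--         if word == stop_word:
--             break
--         result.append(word)
--     return ' '.join(result)
-- ===== SOURCE B (Python) =====
-- def stop_at_word(input_string, stop_word):
--     words = input_string.split()
--     try:
--         idx = words.index(stop_word)
--     except ValueError:
--         idx = len(words)
--     return ' '.join(words[:idx])
-- ===== Notes on version B (the rewrite author's own statement) =====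
-- stated objective: idiomatic
-- what changed: Replaces the accumulate-until-break loop with a locate-then-slice decomposition: find the stop word's position with list.index (len(words) if absent) and join the slice before it, maintaining no incremental result list.
import Mathlib
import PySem

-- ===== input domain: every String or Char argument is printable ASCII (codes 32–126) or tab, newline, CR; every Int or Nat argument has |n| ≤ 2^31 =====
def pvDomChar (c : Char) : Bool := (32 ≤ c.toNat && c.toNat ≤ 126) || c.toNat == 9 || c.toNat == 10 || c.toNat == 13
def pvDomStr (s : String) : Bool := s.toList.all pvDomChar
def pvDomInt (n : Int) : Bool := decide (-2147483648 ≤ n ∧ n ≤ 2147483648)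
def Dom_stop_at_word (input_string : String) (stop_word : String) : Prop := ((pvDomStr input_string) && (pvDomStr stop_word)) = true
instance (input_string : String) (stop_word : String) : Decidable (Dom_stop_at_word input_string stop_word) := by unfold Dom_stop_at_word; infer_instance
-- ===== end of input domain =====

-- B replaces A's accumulate-until-break loop by locating the stop word with
-- list.index (defaulting to len(words) when absent) and joining the slice
-- before that position; objective: idiomatic, same cost.

-- ===== PORT A =====
-- A's for-loop with break, carrying the growing `result` accumulator.
def pvStopLoop (ws : List String) (stop_word : String) (result : List String) : List String :=
  match ws with
  | [] => result
  | w :: rest => if w = stop_word then result else pvStopLoop rest stop_word (result ++ [w])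

def stop_at_word (input_string : String) (stop_word : String) : String :=
  let words := PySem.Str.split₀ input_string
  let result := pvStopLoop words stop_word []
  PySem.Str.join " " result

-- ===== PORT B =====
def stop_at_word_alt (input_string : String) (stop_word : String) : String :=
  let words := PySem.Str.split₀ input_string
  let idx := (PySem.List.index? words stop_word).getD words.length
  PySem.Str.join " " (PySem.List.slice words none (some (idx : Int)))

-- ===== PRECONDITION & SPEC =====
def Spec_stop_at_word (input_string : String) (stop_word : String) (out : String) : Prop := out = stop_at_word_alt input_string stop_word
instance (input_string : String) (stop_word : String) (out : String) : Decidable (Spec_stop_at_word input_string stop_word out) := by unfold Spec_stop_at_word; infer_instance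

-- ===== CLAIM (what is proved, stated in full; the proofs are below) =====
def Claim_equal_stop_at_word : Prop := ∀ (input_string : String) (stop_word : String), Dom_stop_at_word input_string stop_word → Spec_stop_at_word input_string stop_word (stop_at_word input_string stop_word)

-- ===== LEMMAS AND PROOFS =====

theorem pvStopLoop_eq_take (ws : List String) (sw : String) (acc : List String) :
    pvStopLoop ws sw acc = acc ++ ws.take ((PySem.List.index? ws sw).getD ws.length) := by
  rw [PySem.List.index?_eq_idxOf?]
  induction ws generalizing acc with
  | nil => simp [pvStopLoop]
  | cons w rest ih =>
    by_cases h : w = sw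
    · subst h
      simp [pvStopLoop, List.idxOf?_cons]
    · rw [pvStopLoop, if_neg h, ih,
        show List.idxOf? sw (w :: rest) = (List.idxOf? sw rest).map (· + 1) by
          simp [List.idxOf?_cons, h]]
      cases hidx : List.idxOf? sw rest with
      | none => simp
      | some k => simp

theorem stop_at_word_spec : Claim_equal_stop_at_word := by
  intro input_string stop_word _
  unfold Spec_stop_at_word stop_at_word stop_at_word_alt
  simp only []
  rw [pvStopLoop_eq_take, PySem.List.slice_to_natCast]
  simp
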